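-- pv_equiv track=rewrite | github.com/DSXiangLi/ChineseNER | data/people_daily_augment/augmentation.py | chunk_by_tag
-- ===== SOURCE A (Python) =====
-- def chunk_by_tag(sentence, label):
--     pre_tag = ''
--     s_chunk = []
--     l_chunk = []
--     for pos, (s,l) in enumerate(zip(sentence.split(' '), label.split(' '))):
--         # get NER type
--         if l!='O':
--             tag = l.split('-')[1]
--         else:
--             tag = 'O'
--
--         if pre_tag == '':
--             pre_tag = tag
--             s_chunk = [s]
--             l_chunk = [l]
--
--         elif pre_tag == tag and l.split('-')[0]!='B':
--             s_chunk.append(s)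
--             l_chunk.append(l)
--         else:
--             yield pre_tag, ' '.join(s_chunk), ' '.join(l_chunk)
--             pre_tag = tag
--             s_chunk=[s]
--             l_chunk=[l]
--     if s_chunk:
--         yield pre_tag, ' '.join(s_chunk), ' '.join(l_chunk)
-- ===== SOURCE B (Python) =====
-- def chunk_by_tag(sentence, label):
--     pairs = list(zip(sentence.split(' '), label.split(' ')))
--
--     def tag_of(l):
--         return 'O' if l == 'O' else l.split('-')[1]
--
--     i = 0
--     while i < len(pairs):
--         t = tag_of(pairs[i][1])
--         j = i + 1
--         while (j < len(pairs) and tag_of(pairs[j][1]) == t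
--                and pairs[j][1].split('-')[0] != 'B'):
--             j += 1
--         yield (t,
--                ' '.join(s for s, _ in pairs[i:j]),
--                ' '.join(l for _, l in pairs[i:j]))
--         i = j
-- ===== Notes on version B (the rewrite author's own statement) =====
-- stated objective: alternative
-- what changed: A is one stateful pass that accumulates a current chunk and flushes it on boundaries; B instead peels maximal chunks off the front of the zipped token/label list (an outer loop that scans ahead with an inner loop / takeWhile to find each chunk's end, then slices and joins it), with no accumulator state.
-- intended difference: On inputs whose zipped token/label pairs contain a non-final label with an empty entity type after '-' (e.g. 'I-'), A silently drops that chunk (its pre_tag=='' reset discards the pending chunk without yielding it), while B yields every chunk; yielding all chunks is the intended grouping. — e.g. on chunk_by_tag("a b", "I- O"): A returns [("O", "b", "O")], B returns [("", "a", "I-"), ("O", "b", "O")]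
import Mathlib
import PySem

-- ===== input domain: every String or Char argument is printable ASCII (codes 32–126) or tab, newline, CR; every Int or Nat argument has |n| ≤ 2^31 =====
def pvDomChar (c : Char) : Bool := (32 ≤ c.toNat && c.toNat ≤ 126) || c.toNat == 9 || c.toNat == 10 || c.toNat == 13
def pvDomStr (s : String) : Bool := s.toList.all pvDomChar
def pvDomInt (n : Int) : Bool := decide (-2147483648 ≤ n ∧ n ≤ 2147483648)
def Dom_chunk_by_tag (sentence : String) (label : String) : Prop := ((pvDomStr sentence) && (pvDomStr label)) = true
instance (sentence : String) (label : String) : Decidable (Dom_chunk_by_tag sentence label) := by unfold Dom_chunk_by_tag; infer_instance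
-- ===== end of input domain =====

-- B groups the zipped pairs by peeling maximal chunks off the front (outer/inner loop) instead of
-- A's single stateful accumulate-and-flush pass; B also yields the chunks A's pre_tag=='' reset drops.

-- shared helpers: l.split(sep) for a NONEMPTY literal sep (PySem.Str.split? is none only for
-- sep = ""), and the tag expression ('O' for label 'O', else l.split('-')[1]) both sources compute
def pySplit (s sep : String) : List String := (PySem.Str.split? s sep).getD []
def pvTag (l : String) : String :=
  if l = "O" then "O" else PySem.List.pyGetD (pySplit l "-") 1 ""

-- ===== PORT A =====
-- A's loop state: pre_tag, s_chunk, l_chunk, plus the list of yielded triples (the generator's output).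
def chunkLoopA : String → List String → List String → List (String × String × String) →
    List (String × String) → List (String × String × String)
  | pre, sC, lC, out, [] =>
      if sC ≠ [] then out ++ [(pre, PySem.Str.join " " sC, PySem.Str.join " " lC)] else out
  | pre, sC, lC, out, (s, l) :: rest =>
      let tag := pvTag l
      if pre = "" then
        chunkLoopA tag [s] [l] out rest
      else if pre = tag ∧ PySem.List.pyGetD (pySplit l "-") 0 "" ≠ "B" then
        chunkLoopA pre (sC ++ [s]) (lC ++ [l]) out rest
      else
        chunkLoopA tag [s] [l] (out ++ [(pre, PySem.Str.join " " sC, PySem.Str.join " " lC)]) rest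

def chunk_by_tag (sentence : String) (label : String) : List (String × String × String) :=
  chunkLoopA "" [] [] [] ((pySplit sentence " ").zip (pySplit label " "))

-- ===== PORT B =====
-- Source B's inner-while condition: the pair continues the chunk whose tag is t
def pvCont (t : String) (q : String × String) : Bool :=
  pvTag q.2 == t && PySem.List.pyGetD (pySplit q.2 "-") 0 "" != "B"

-- Source B's outer while loop: peel the maximal chunk off the front (takeWhile = the inner while),
-- yield it, continue at j.  fuel = list length is only a structural-termination device.
def chunksBGo : Nat → List (String × String) → List (String × String × String)
  | _, [] => []
  | 0, _ :: _ => []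
  | fuel + 1, p :: ps =>
      let t := pvTag p.2
      (t, PySem.Str.join " " (p.1 :: (ps.takeWhile (pvCont t)).map Prod.fst),
          PySem.Str.join " " (p.2 :: (ps.takeWhile (pvCont t)).map Prod.snd)) ::
        chunksBGo fuel (ps.dropWhile (pvCont t))

def chunksB (ps : List (String × String)) : List (String × String × String) :=
  chunksBGo ps.length ps

def chunk_by_tag_alt (sentence : String) (label : String) : List (String × String × String) :=
  chunksB ((pySplit sentence " ").zip (pySplit label " "))

-- ===== PRECONDITION & SPEC =====
-- A raises IndexError (l.split('-')[1]) on any zipped label token that is neither 'O' nor contains '-'.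
def Pre_chunk_by_tag (sentence : String) (label : String) : Prop :=
  ∀ p ∈ (pySplit sentence " ").zip (pySplit label " "),
    p.2 = "O" ∨ PySem.Str.isIn "-" p.2 = true
instance (sentence : String) (label : String) : Decidable (Pre_chunk_by_tag sentence label) := by
  unfold Pre_chunk_by_tag; infer_instance

def pvWitness_chunk_by_tag : String × String := ("John Smith lives", "B-PER I-PER O")

-- On inputs whose zipped pairs contain a NON-FINAL label with empty entity type after '-' (e.g. 'I-'),
-- A silently drops that chunk (its pre_tag=='' reset discards it without yielding), while B yields
-- every chunk; yielding all chunks is the intended grouping.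
def D_chunk_by_tag (sentence : String) (label : String) : Prop :=
  ∃ t ∈ (PySem.Chars.splitOn label.toList [' ']).take
      (min (PySem.Chars.splitOn sentence.toList [' ']).length
           (PySem.Chars.splitOn label.toList [' ']).length - 1),
    t ≠ ['O'] ∧ (PySem.Chars.splitOn t ['-']).getD 1 [] = []
instance (sentence : String) (label : String) : Decidable (D_chunk_by_tag sentence label) := by
  unfold D_chunk_by_tag; infer_instance

def Spec_chunk_by_tag (sentence : String) (label : String)
    (out : List (String × String × String)) : Prop :=
  ¬ D_chunk_by_tag sentence label → out = chunk_by_tag_alt sentence label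
instance (sentence : String) (label : String) (out : List (String × String × String)) :
    Decidable (Spec_chunk_by_tag sentence label out) := by
  unfold Spec_chunk_by_tag; infer_instance

def pvDiffWitness_chunk_by_tag : String × String := ("a b", "I- O")
def pvDiffWitnessOut_chunk_by_tag :
    (List (String × String × String)) × (List (String × String × String)) :=
  ([("O", "b", "O")], [("", "a", "I-"), ("O", "b", "O")])

-- ===== CLAIM =====
def Claim_unchanged_chunk_by_tag : Prop :=
  ∀ (sentence : String) (label : String), Dom_chunk_by_tag sentence label →
    Pre_chunk_by_tag sentence label →
    Spec_chunk_by_tag sentence label (chunk_by_tag sentence label)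

def Claim_changed_chunk_by_tag : Prop :=
  Dom_chunk_by_tag (pvDiffWitness_chunk_by_tag.1) (pvDiffWitness_chunk_by_tag.2) ∧
  Pre_chunk_by_tag (pvDiffWitness_chunk_by_tag.1) (pvDiffWitness_chunk_by_tag.2) ∧
  D_chunk_by_tag (pvDiffWitness_chunk_by_tag.1) (pvDiffWitness_chunk_by_tag.2) ∧
  chunk_by_tag (pvDiffWitness_chunk_by_tag.1) (pvDiffWitness_chunk_by_tag.2) = pvDiffWitnessOut_chunk_by_tag.1 ∧
  chunk_by_tag_alt (pvDiffWitness_chunk_by_tag.1) (pvDiffWitness_chunk_by_tag.2) = pvDiffWitnessOut_chunk_by_tag.2 ∧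
  pvDiffWitnessOut_chunk_by_tag.1 ≠ pvDiffWitnessOut_chunk_by_tag.2

def Claim_exact_chunk_by_tag : Prop :=
  ∀ (sentence : String) (label : String), Dom_chunk_by_tag sentence label →
    Pre_chunk_by_tag sentence label → D_chunk_by_tag sentence label →
    chunk_by_tag sentence label ≠ chunk_by_tag_alt sentence label

-- ===== LEMMAS AND PROOFS =====

-- the fuel is irrelevant as soon as it covers the list length
theorem chunksBGo_fuel : ∀ (f1 f2 : Nat) (ps : List (String × String)),
    ps.length ≤ f1 → ps.length ≤ f2 → chunksBGo f1 ps = chunksBGo f2 ps := by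
  intro f1
  induction f1 with
  | zero =>
      intro f2 ps h1 _
      cases ps with
      | nil => cases f2 <;> rfl
      | cons p ps => simp at h1
  | succ g1 ih =>
      intro f2 ps h1 h2
      cases ps with
      | nil => cases f2 <;> rfl
      | cons p ps =>
          cases f2 with
          | zero => simp at h2
          | succ g2 =>
              simp only [chunksBGo]
              have hd : (ps.dropWhile (pvCont (pvTag p.2))).length ≤ ps.length :=
                List.length_dropWhile_le _ _
              simp only [List.length_cons, Nat.succ_le_succ_iff] at h1 h2
              rw [ih g2 _ (le_trans hd h1) (le_trans hd h2)]

theorem chunksB_cons (p : String × String) (ps : List (String × String)) :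
    chunksB (p :: ps) =
      (pvTag p.2, PySem.Str.join " " (p.1 :: (ps.takeWhile (pvCont (pvTag p.2))).map Prod.fst),
                  PySem.Str.join " " (p.2 :: (ps.takeWhile (pvCont (pvTag p.2))).map Prod.snd)) ::
        chunksB (ps.dropWhile (pvCont (pvTag p.2))) := by
  unfold chunksB
  simp only [List.length_cons, chunksBGo]
  rw [chunksBGo_fuel ps.length (ps.dropWhile (pvCont (pvTag p.2))).length _
        (List.length_dropWhile_le _ _) le_rfl]

-- Invariant: with a nonempty pending chunk whose tag pre ≠ "", and no non-final empty-tag label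
-- ahead, A's loop emits out, then the pending chunk extended by the maximal continuation prefix,
-- then B's chunking of what remains.
theorem loop_cont (rest : List (String × String)) :
    ∀ (pre : String) (gs gl : List String) (out : List (String × String × String)),
      pre ≠ "" → gs ≠ [] →
      (∀ p ∈ rest.dropLast, pvTag p.2 ≠ "") →
      chunkLoopA pre gs gl out rest =
        out ++ (pre, PySem.Str.join " " (gs ++ (rest.takeWhile (pvCont pre)).map Prod.fst),
                     PySem.Str.join " " (gl ++ (rest.takeWhile (pvCont pre)).map Prod.snd)) ::
               chunksB (rest.dropWhile (pvCont pre)) := by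
  induction rest with
  | nil =>
      intro pre gs gl out hpre hgs _
      simp [chunkLoopA, chunksB, chunksBGo, hgs]
  | cons q r ih =>
      intro pre gs gl out hpre hgs hclean
      obtain ⟨s, l⟩ := q
      have hclean' : ∀ p ∈ r.dropLast, pvTag p.2 ≠ "" := by
        intro p hp
        apply hclean
        cases r with
        | nil => simp at hp
        | cons a b =>
            simp only [List.dropLast_cons₂] at hp ⊢
            exact List.mem_cons_of_mem _ hp
      by_cases hc : pvCont pre (s, l) = true
      · -- the pair continues the chunk
        have hc' : pre = pvTag l ∧ PySem.List.pyGetD (pySplit l "-") 0 "" ≠ "B" := by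
          unfold pvCont at hc
          simp only [Bool.and_eq_true, beq_iff_eq, bne_iff_ne, ne_eq] at hc
          exact ⟨hc.1.symm, hc.2⟩
        have step : chunkLoopA pre gs gl out ((s, l) :: r) =
            chunkLoopA pre (gs ++ [s]) (gl ++ [l]) out r := by
          simp only [chunkLoopA]
          rw [if_neg hpre, if_pos hc']
        rw [step, ih pre (gs ++ [s]) (gl ++ [l]) out hpre (by simp) hclean']
        simp [hc, List.append_assoc]
      · -- boundary: A flushes, B starts a new chunk here
        have hnot : ¬ (pre = pvTag l ∧ PySem.List.pyGetD (pySplit l "-") 0 "" ≠ "B") := by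
          rintro ⟨h1, h2⟩
          apply hc
          unfold pvCont
          simp only [Bool.and_eq_true, beq_iff_eq, bne_iff_ne]
          exact ⟨h1.symm, h2⟩
        have step : chunkLoopA pre gs gl out ((s, l) :: r) =
            chunkLoopA (pvTag l) [s] [l]
              (out ++ [(pre, PySem.Str.join " " gs, PySem.Str.join " " gl)]) r := by
          simp only [chunkLoopA]
          rw [if_neg hpre, if_neg hnot]
        rw [step]
        by_cases ht : pvTag l = ""
        · -- empty tag: by hclean this must be the last pair, so r = []
          have hr : r = [] := by
            cases r with
            | nil => rfl
            | cons a b =>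
                exact absurd ht (hclean (s, l) (by simp [List.dropLast_cons₂]))
          subst hr
          simp [chunkLoopA, chunksB, chunksBGo, hc]
        · rw [ih (pvTag l) [s] [l] _ ht (by simp) hclean']
          have hcf : pvCont pre (s, l) = false := by simpa using hc
          simp [hcf, chunksB_cons]

theorem loop_eq_chunksB (ps : List (String × String))
    (hclean : ∀ p ∈ ps.dropLast, pvTag p.2 ≠ "") :
    chunkLoopA "" [] [] [] ps = chunksB ps := by
  cases ps with
  | nil => simp [chunkLoopA, chunksB, chunksBGo]
  | cons q r =>
      obtain ⟨s, l⟩ := q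
      have step : chunkLoopA "" [] [] [] ((s, l) :: r) = chunkLoopA (pvTag l) [s] [l] [] r := by
        simp [chunkLoopA]
      rw [step]
      have hclean' : ∀ p ∈ r.dropLast, pvTag p.2 ≠ "" := by
        intro p hp
        apply hclean
        cases r with
        | nil => simp at hp
        | cons a b =>
            simp only [List.dropLast_cons₂] at hp ⊢
            exact List.mem_cons_of_mem _ hp
      by_cases ht : pvTag l = ""
      · have hr : r = [] := by
          cases r with
          | nil => rfl
          | cons a b =>
              exact absurd ht (hclean (s, l) (by simp [List.dropLast_cons₂]))
        subst hr
        simp [chunkLoopA, chunksB, chunksBGo]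
      · rw [loop_cont r (pvTag l) [s] [l] [] ht (by simp) hclean']
        rw [chunksB_cons (s, l) r]
        simp

-- bridge: the ports' split (pySplit, on String) is Chars.splitOn on the code points
theorem pySplit_toList (s sep : String) (h : sep.toList ≠ []) :
    (pySplit s sep).map String.toList = PySem.Chars.splitOn s.toList sep.toList := by
  have hch : PySem.Chars.split? s.toList sep.toList =
      some (PySem.Chars.splitOn s.toList sep.toList) := by
    unfold PySem.Chars.split?
    rw [if_neg (by simpa [List.isEmpty_iff] using h)]
  have hb := PySem.Str.split?_map s sep
  rw [hch] at hb
  cases hs : PySem.Str.split? s sep with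
  | none => rw [hs] at hb; simp at hb
  | some ys =>
      rw [hs] at hb
      simp only [Option.map_some] at hb
      unfold pySplit
      rw [hs]
      simpa using hb

-- pvTag x = "" stated purely on x's code points (the shape D_ talks about)
theorem pvTag_empty_iff (x : String) :
    pvTag x = "" ↔
      x.toList ≠ ['O'] ∧ (PySem.Chars.splitOn x.toList ['-']).getD 1 [] = [] := by
  have hsplit : (pySplit x "-").map String.toList = PySem.Chars.splitOn x.toList ['-'] := by
    have := pySplit_toList x "-" (by decide)
    simpa [show ("-" : String).toList = ['-'] from by decide] using this
  unfold pvTag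
  by_cases hO : x = "O"
  · subst hO
    simp [show ("O" : String).toList = ['O'] from by decide]
  · have hO' : x.toList ≠ ['O'] := fun hh =>
      hO (String.toList_inj.mp (by simpa [show ("O" : String).toList = ['O'] from by decide] using hh))
    rw [if_neg hO, ← hsplit, PySem.List.pyGetD_ofNat']
    rw [List.getD_eq_getElem?_getD, List.getD_eq_getElem?_getD, List.getElem?_map]
    cases hy : (pySplit x "-")[1]? with
    | none => simp [hO']
    | some y => simp [hO', String.toList_eq_nil_iff]

-- ¬ D_ says exactly: no non-final zipped pair has an empty tag.
theorem not_D_clean (sentence label : String) (hD : ¬ D_chunk_by_tag sentence label) :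
    ∀ p ∈ ((pySplit sentence " ").zip (pySplit label " ")).dropLast,
      pvTag p.2 ≠ "" := by
  intro p hp hempty
  apply hD
  have hsp : (" " : String).toList = [' '] := by decide
  have hmS : (pySplit sentence " ").map String.toList =
      PySem.Chars.splitOn sentence.toList [' '] := by
    have := pySplit_toList sentence " " (by decide)
    simpa [hsp] using this
  have hmL : (pySplit label " ").map String.toList =
      PySem.Chars.splitOn label.toList [' '] := by
    have := pySplit_toList label " " (by decide)
    simpa [hsp] using this
  obtain ⟨i, hi, hgot⟩ := List.mem_iff_getElem.mp hp
  have hiz : i + 1 ≤ ((pySplit sentence " ").zip (pySplit label " ")).length := by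
    have := List.length_dropLast (xs := (pySplit sentence " ").zip (pySplit label " "))
    omega
  have hizlt : i < ((pySplit sentence " ").zip (pySplit label " ")).length := by omega
  have hlz : ((pySplit sentence " ").zip (pySplit label " ")).length =
      min (pySplit sentence " ").length (pySplit label " ").length := List.length_zip
  have hiL : i < (pySplit label " ").length := by omega
  have hp2 : p.2 = (pySplit label " ")[i] := by
    rw [← hgot, List.getElem_dropLast, List.getElem_zip]
  have hlenS : (PySem.Chars.splitOn sentence.toList [' ']).length =
      (pySplit sentence " ").length := by rw [← hmS, List.length_map]
  have hlenL : (PySem.Chars.splitOn label.toList [' ']).length =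
      (pySplit label " ").length := by rw [← hmL, List.length_map]
  refine ⟨p.2.toList, ?_, ?_⟩
  · rw [List.mem_iff_getElem]
    have hidrop : i < ((pySplit sentence " ").zip (pySplit label " ")).dropLast.length := hi
    have hlen' : i < min (PySem.Chars.splitOn sentence.toList [' ']).length
        (PySem.Chars.splitOn label.toList [' ']).length - 1 := by
      rw [hlenS, hlenL]
      have := List.length_dropLast (xs := (pySplit sentence " ").zip (pySplit label " "))
      omega
    refine ⟨i, ?_, ?_⟩
    · simp only [List.length_take, ← hmL, List.length_map]
      omega
    · rw [List.getElem_take]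
      have hb : i < (PySem.Chars.splitOn label.toList [' ']).length := by omega
      have h2 : (PySem.Chars.splitOn label.toList [' '])[i]? = some p.2.toList := by
        rw [← hmL, List.getElem?_map, List.getElem?_eq_getElem hiL]
        simp [hp2]
      rw [List.getElem?_eq_getElem hb] at h2
      exact Option.some.inj h2
  · have := (pvTag_empty_iff p.2).mp hempty
    exact this


-- ===== tightness: inside D_ the two outputs always differ =====
-- Counting measure: total code-point length of the label-join components plus the number of
-- chunks.  B's output always carries every zipped pair once; A's pre_tag=='' reset drops a
-- nonempty pending chunk, so its measure is strictly smaller.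

def pvW (lC : List String) : Nat := (lC.map (fun x => x.toList.length)).sum + lC.length
def pvS (ps : List (String × String)) : Nat := (ps.map (fun p => p.2.toList.length)).sum + ps.length
def pvNu (out : List (String × String × String)) : Nat :=
  (out.map (fun c => c.2.2.toList.length)).sum + out.length

theorem pvW_pos (lC : List String) (h : lC ≠ []) : 1 ≤ pvW lC := by
  have := List.length_pos_of_ne_nil h
  simp [pvW]
  omega

theorem pvNu_snoc (out : List (String × String × String)) (c : String × String × String) :
    pvNu (out ++ [c]) = pvNu out + c.2.2.toList.length + 1 := by
  simp [pvNu]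
  omega

theorem pvJoinLenC (ps : List (List Char)) : ps ≠ [] →
    (PySem.Chars.join [' '] ps).length + 1 = (ps.map List.length).sum + ps.length := by
  induction ps with
  | nil => intro h; simp at h
  | cons a rest ih =>
      intro _
      cases rest with
      | nil => simp [PySem.Chars.join_singleton]
      | cons b r =>
          rw [PySem.Chars.join_cons_cons]
          have h2 := ih (by simp)
          simp only [List.length_append, List.map_cons, List.sum_cons, List.length_cons,
            List.length_nil] at h2 ⊢
          omega

theorem pvJoinLen (ls : List String) (h : ls ≠ []) :
    (PySem.Str.join " " ls).toList.length + 1 = (ls.map (fun x => x.toList.length)).sum + ls.length := by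
  rw [PySem.Str.toList_join]
  have h2 := pvJoinLenC (ls.map String.toList) (by simpa using h)
  simpa [show (" " : String).toList = [' '] from by decide, List.map_map, Function.comp_def] using h2

-- flushing the pending chunk adds exactly its weight to the emitted measure
theorem pvNu_flush (out : List (String × String × String)) (pre : String)
    (sC lC : List String) (hl : lC ≠ []) :
    pvNu (out ++ [(pre, PySem.Str.join " " sC, PySem.Str.join " " lC)]) = pvNu out + pvW lC := by
  rw [pvNu_snoc]
  have := pvJoinLen lC hl
  simp only [pvW]
  omega

-- A's loop never exceeds the measure of its remaining input plus its pending state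
theorem nuA_le (rest : List (String × String)) :
    ∀ (pre : String) (sC lC : List String) (out : List (String × String × String)),
      sC ≠ [] → lC ≠ [] →
      pvNu (chunkLoopA pre sC lC out rest) ≤ pvNu out + pvW lC + pvS rest := by
  induction rest with
  | nil =>
      intro pre sC lC out hs hl
      simp only [chunkLoopA]
      rw [if_pos hs, pvNu_flush out pre sC lC hl]
      simp [pvS]
  | cons q r ih =>
      intro pre sC lC out hs hl
      obtain ⟨s, l⟩ := q
      have hS : pvS ((s, l) :: r) = l.toList.length + 1 + pvS r := by simp [pvS]; omega
      by_cases h0 : pre = ""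
      · have step : chunkLoopA pre sC lC out ((s, l) :: r) =
            chunkLoopA (pvTag l) [s] [l] out r := by
          simp only [chunkLoopA]; rw [if_pos h0]
        rw [step]
        have hle := ih (pvTag l) [s] [l] out (by simp) (by simp)
        simp only [pvW, List.map_cons, List.map_nil, List.sum_cons, List.sum_nil,
          List.length_cons, List.length_nil] at hle ⊢
        omega
      · by_cases hc : pre = pvTag l ∧ PySem.List.pyGetD (pySplit l "-") 0 "" ≠ "B"
        · have step : chunkLoopA pre sC lC out ((s, l) :: r) =
              chunkLoopA pre (sC ++ [s]) (lC ++ [l]) out r := by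
            simp only [chunkLoopA]; rw [if_neg h0, if_pos hc]
          rw [step]
          have hle := ih pre (sC ++ [s]) (lC ++ [l]) out (by simp) (by simp)
          simp only [pvW, List.map_append, List.map_cons, List.map_nil, List.sum_append,
            List.sum_cons, List.sum_nil, List.length_append, List.length_cons,
            List.length_nil] at hle ⊢
          omega
        · have step : chunkLoopA pre sC lC out ((s, l) :: r) =
              chunkLoopA (pvTag l) [s] [l]
                (out ++ [(pre, PySem.Str.join " " sC, PySem.Str.join " " lC)]) r := by
            simp only [chunkLoopA]; rw [if_neg h0, if_neg hc]
          rw [step]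
          have hle := ih (pvTag l) [s] [l]
            (out ++ [(pre, PySem.Str.join " " sC, PySem.Str.join " " lC)]) (by simp) (by simp)
          rw [pvNu_flush out pre sC lC hl] at hle
          simp only [pvW, List.map_cons, List.map_nil, List.sum_cons, List.sum_nil,
            List.length_cons, List.length_nil] at hle ⊢
          omega

-- …and it falls strictly short as soon as a drop is forced:
-- pre == '' with a nonempty pending chunk, or a non-final empty tag ahead
theorem nuA_lt (rest : List (String × String)) :
    ∀ (pre : String) (sC lC : List String) (out : List (String × String × String)),
      sC ≠ [] → lC ≠ [] →
      ((pre = "" ∧ rest ≠ []) ∨ ∃ p ∈ rest.dropLast, pvTag p.2 = "") →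
      pvNu (chunkLoopA pre sC lC out rest) < pvNu out + pvW lC + pvS rest := by
  induction rest with
  | nil =>
      intro pre sC lC out _ _ hprem
      rcases hprem with ⟨_, hne⟩ | ⟨p, hp, _⟩
      · exact absurd rfl hne
      · simp at hp
  | cons q r ih =>
      intro pre sC lC out hs hl hprem
      obtain ⟨s, l⟩ := q
      by_cases h0 : pre = ""
      · -- the drop happens right here: sC/lC are discarded unyielded
        have step : chunkLoopA pre sC lC out ((s, l) :: r) =
            chunkLoopA (pvTag l) [s] [l] out r := by
          simp only [chunkLoopA]; rw [if_pos h0]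
        rw [step]
        have hle := nuA_le r (pvTag l) [s] [l] out (by simp) (by simp)
        have hw := pvW_pos lC hl
        simp only [pvW, List.map_cons, List.map_nil, List.sum_cons, List.sum_nil,
          List.length_cons, List.length_nil, pvS, List.length_cons] at hle hw ⊢
        omega
      · have hprem' : ∃ p ∈ ((s, l) :: r).dropLast, pvTag p.2 = "" := by
          rcases hprem with ⟨h0', _⟩ | h
          · exact absurd h0' h0
          · exact h
        by_cases hc : pre = pvTag l ∧ PySem.List.pyGetD (pySplit l "-") 0 "" ≠ "B"
        · have step : chunkLoopA pre sC lC out ((s, l) :: r) =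
              chunkLoopA pre (sC ++ [s]) (lC ++ [l]) out r := by
            simp only [chunkLoopA]; rw [if_neg h0, if_pos hc]
          rw [step]
          have hbad : ∃ p ∈ r.dropLast, pvTag p.2 = "" := by
            cases r with
            | nil => simp at hprem'
            | cons a b =>
                obtain ⟨p, hp, hbp⟩ := hprem'
                rw [List.dropLast_cons₂] at hp
                rcases List.mem_cons.mp hp with hph | hpt
                · exfalso
                  apply h0
                  rw [hc.1, ← hbp, hph]
                · exact ⟨p, hpt, hbp⟩
          have hlt := ih pre (sC ++ [s]) (lC ++ [l]) out (by simp) (by simp) (Or.inr hbad)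
          simp only [pvW, List.map_append, List.map_cons, List.map_nil, List.sum_append,
            List.sum_cons, List.sum_nil, List.length_append, List.length_cons,
            List.length_nil, pvS] at hlt ⊢
          omega
        · have step : chunkLoopA pre sC lC out ((s, l) :: r) =
              chunkLoopA (pvTag l) [s] [l]
                (out ++ [(pre, PySem.Str.join " " sC, PySem.Str.join " " lC)]) r := by
            simp only [chunkLoopA]; rw [if_neg h0, if_neg hc]
          rw [step]
          have hprem'' : (pvTag l = "" ∧ r ≠ []) ∨ ∃ p ∈ r.dropLast, pvTag p.2 = "" := by
            cases r with
            | nil => simp at hprem'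
            | cons a b =>
                obtain ⟨p, hp, hbp⟩ := hprem'
                rw [List.dropLast_cons₂] at hp
                rcases List.mem_cons.mp hp with hph | hpt
                · exact Or.inl ⟨by rw [← hbp, hph], by simp⟩
                · exact Or.inr ⟨p, hpt, hbp⟩
          have hlt := ih (pvTag l) [s] [l]
            (out ++ [(pre, PySem.Str.join " " sC, PySem.Str.join " " lC)])
            (by simp) (by simp) hprem''
          rw [pvNu_flush out pre sC lC hl] at hlt
          simp only [pvW, List.map_cons, List.map_nil, List.sum_cons, List.sum_nil,
            List.length_cons, List.length_nil, pvS] at hlt ⊢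
          omega

-- B's output always carries every zipped pair exactly once
theorem nuB (n : Nat) : ∀ (ps : List (String × String)), ps.length ≤ n →
    pvNu (chunksB ps) = pvS ps := by
  induction n with
  | zero =>
      intro ps h
      cases ps with
      | nil => simp [chunksB, chunksBGo, pvNu, pvS]
      | cons p r => simp at h
  | succ m ih =>
      intro ps h
      cases ps with
      | nil => simp [chunksB, chunksBGo, pvNu, pvS]
      | cons p r =>
          rw [chunksB_cons]
          have hrec := ih (r.dropWhile (pvCont (pvTag p.2)))
            (le_trans (List.length_dropWhile_le _ _) (by simpa using Nat.le_of_succ_le_succ h))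
          have hj := pvJoinLen (p.2 :: (r.takeWhile (pvCont (pvTag p.2))).map Prod.snd) (by simp)
          have hsplit : r = r.takeWhile (pvCont (pvTag p.2)) ++ r.dropWhile (pvCont (pvTag p.2)) :=
            (List.takeWhile_append_dropWhile).symm
          conv_rhs => rw [show (p :: r) = p :: (r.takeWhile (pvCont (pvTag p.2)) ++
            r.dropWhile (pvCont (pvTag p.2))) from by rw [← hsplit]]
          simp only [pvNu, pvS, List.map_cons, List.sum_cons, List.length_cons,
            List.map_append, List.sum_append, List.length_append, List.map_map,
            List.length_map, Function.comp_def] at hrec hj ⊢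
          omega

-- D_ produces a witness pair among the zipped pairs (converse direction of not_D_clean)
theorem D_to_pair (sentence label : String) (hD : D_chunk_by_tag sentence label) :
    ∃ p ∈ ((pySplit sentence " ").zip (pySplit label " ")).dropLast, pvTag p.2 = "" := by
  have hsp : (" " : String).toList = [' '] := by decide
  have hmS : (pySplit sentence " ").map String.toList =
      PySem.Chars.splitOn sentence.toList [' '] := by
    have := pySplit_toList sentence " " (by decide)
    simpa [hsp] using this
  have hmL : (pySplit label " ").map String.toList =
      PySem.Chars.splitOn label.toList [' '] := by
    have := pySplit_toList label " " (by decide)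
    simpa [hsp] using this
  obtain ⟨t, ht, hbad⟩ := hD
  obtain ⟨i, hi, hgot⟩ := List.mem_iff_getElem.mp ht
  have hlenS : (PySem.Chars.splitOn sentence.toList [' ']).length =
      (pySplit sentence " ").length := by rw [← hmS, List.length_map]
  have hlenL : (PySem.Chars.splitOn label.toList [' ']).length =
      (pySplit label " ").length := by rw [← hmL, List.length_map]
  have hitk : i < min (PySem.Chars.splitOn sentence.toList [' ']).length
      (PySem.Chars.splitOn label.toList [' ']).length - 1 ∧
      i < (PySem.Chars.splitOn label.toList [' ']).length := by
    simp only [List.length_take] at hi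
    omega
  have hlz : ((pySplit sentence " ").zip (pySplit label " ")).length =
      min (pySplit sentence " ").length (pySplit label " ").length := List.length_zip
  have hiL : i < (pySplit label " ").length := by omega
  have hiz : i < ((pySplit sentence " ").zip (pySplit label " ")).length := by omega
  refine ⟨((pySplit sentence " ").zip (pySplit label " "))[i], ?_, ?_⟩
  · rw [List.mem_iff_getElem]
    refine ⟨i, ?_, ?_⟩
    · rw [List.length_dropLast]
      omega
    · rw [List.getElem_dropLast]
  · have hp2 : ((pySplit sentence " ").zip (pySplit label " "))[i].2 =
        (pySplit label " ")[i] := by rw [List.getElem_zip]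
    have hti : ((pySplit label " ")[i]).toList = t := by
      have h2 : (PySem.Chars.splitOn label.toList [' '])[i]? = some ((pySplit label " ")[i]).toList := by
        rw [← hmL, List.getElem?_map, List.getElem?_eq_getElem hiL]
        rfl
      rw [List.getElem?_eq_getElem (by omega)] at h2
      have h3 := Option.some.inj h2
      rw [← h3, ← hgot, List.getElem_take]
    rw [hp2]
    apply (pvTag_empty_iff _).mpr
    rw [hti]
    exact hbad

-- ===== VERDICT =====
theorem chunk_by_tag_spec : Claim_unchanged_chunk_by_tag := by
  intro sentence label _ _ hD
  unfold chunk_by_tag chunk_by_tag_alt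
  exact loop_eq_chunksB _ (not_D_clean sentence label hD)

theorem chunk_by_tag_changed : Claim_changed_chunk_by_tag := by
  unfold Claim_changed_chunk_by_tag; decide

theorem chunk_by_tag_tight : Claim_exact_chunk_by_tag := by
  intro sentence label _ _ hD heq
  obtain ⟨p, hp, hbadp⟩ := D_to_pair sentence label hD
  have hlt : pvNu (chunk_by_tag sentence label) < pvNu (chunk_by_tag_alt sentence label) := by
    unfold chunk_by_tag chunk_by_tag_alt
    cases hps : (pySplit sentence " ").zip (pySplit label " ") with
    | nil => rw [hps] at hp; simp at hp
    | cons q r =>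
        rw [hps] at hp
        have hr : r ≠ [] := by
          intro hrr
          rw [hrr] at hp
          simp at hp
        have step : chunkLoopA "" [] [] [] (q :: r) =
            chunkLoopA (pvTag q.2) [q.1] [q.2] [] r := by
          obtain ⟨s, l⟩ := q
          simp [chunkLoopA]
        have hprem : (pvTag q.2 = "" ∧ r ≠ []) ∨ ∃ p ∈ r.dropLast, pvTag p.2 = "" := by
          cases r with
          | nil => exact absurd rfl hr
          | cons a b =>
              rw [List.dropLast_cons₂] at hp
              rcases List.mem_cons.mp hp with hph | hpt
              · exact Or.inl ⟨by rw [← hbadp, hph], by simp⟩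
              · exact Or.inr ⟨p, hpt, hbadp⟩
        have hlt1 := nuA_lt r (pvTag q.2) [q.1] [q.2] [] (by simp) (by simp) hprem
        have heqB := nuB (q :: r).length (q :: r) le_rfl
        rw [step]
        calc pvNu (chunkLoopA (pvTag q.2) [q.1] [q.2] [] r)
            < pvNu [] + pvW [q.2] + pvS r := hlt1
          _ = pvS (q :: r) := by simp [pvNu, pvW, pvS]; omega
          _ = pvNu (chunksB (q :: r)) := heqB.symm
  rw [heq] at hlt
  exact lt_irrefl _ hlt
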